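-- pv_equiv track=rewrite | github.com/ETOgaosion/Megatron-LM-AutoTuner | AutoTuner/runtime/baseline/simulator.py | build_pp_stage_layer_counts
-- ===== SOURCE A (Python) =====
-- def build_chunk_layer_counts(
--     total_layers: int, pp_size: int, vpp_size: int
-- ) -> list[int]:
--     total_layers = max(0, int(total_layers))
--     pp_size = max(1, int(pp_size))
--     vpp_size = max(1, int(vpp_size))
--     total_chunks = pp_size * vpp_size
--     counts: list[int] = []
--     for chunk_id in range(total_chunks):
--         start = (chunk_id * total_layers) // total_chunks
--         end = ((chunk_id + 1) * total_layers) // total_chunks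
--         counts.append(max(0, end - start))
--     return counts
--
-- def build_pp_stage_layer_counts(
--     total_layers: int, pp_size: int, vpp_size: int
-- ) -> list[int]:
--     chunk_counts = build_chunk_layer_counts(total_layers, pp_size, vpp_size)
--     stage_counts: list[int] = []
--     for pp_rank in range(max(1, int(pp_size))):
--         stage_counts.append(
--             sum(
--                 chunk_counts[vp_stage * pp_size + pp_rank]
--                 for vp_stage in range(max(1, int(vpp_size)))
--             )
--         )
--     return stage_counts
-- ===== SOURCE B (Python) =====
-- def build_pp_stage_layer_counts(
--     total_layers: int, pp_size: int, vpp_size: int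
-- ) -> list[int]:
--     total_layers = max(0, int(total_layers))
--     pp_size = max(1, int(pp_size))
--     vpp_size = max(1, int(vpp_size))
--     total_chunks = pp_size * vpp_size
--     stage_counts = [0] * pp_size
--     for chunk_id in range(total_chunks):
--         start = (chunk_id * total_layers) // total_chunks
--         end = ((chunk_id + 1) * total_layers) // total_chunks
--         stage_counts[chunk_id % pp_size] += max(0, end - start)
--     return stage_counts
-- ===== Notes on version B (the rewrite author's own statement) =====
-- stated objective: simpler
-- what changed: Fuses A's two phases (build the full per-chunk count table, then a nested strided grouped-sum pass over it) into one single pass over chunk ids that accumulates each chunk's layer count directly into bucket chunk_id % pp_size, with no intermediate list and no helper.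
-- outside the precondition, e.g. on build_pp_stage_layer_counts(7, 0, 2): A returns [6], B returns [7]; on build_pp_stage_layer_counts(7, -2, 3): A raises IndexError, B returns [7]
import Mathlib
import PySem

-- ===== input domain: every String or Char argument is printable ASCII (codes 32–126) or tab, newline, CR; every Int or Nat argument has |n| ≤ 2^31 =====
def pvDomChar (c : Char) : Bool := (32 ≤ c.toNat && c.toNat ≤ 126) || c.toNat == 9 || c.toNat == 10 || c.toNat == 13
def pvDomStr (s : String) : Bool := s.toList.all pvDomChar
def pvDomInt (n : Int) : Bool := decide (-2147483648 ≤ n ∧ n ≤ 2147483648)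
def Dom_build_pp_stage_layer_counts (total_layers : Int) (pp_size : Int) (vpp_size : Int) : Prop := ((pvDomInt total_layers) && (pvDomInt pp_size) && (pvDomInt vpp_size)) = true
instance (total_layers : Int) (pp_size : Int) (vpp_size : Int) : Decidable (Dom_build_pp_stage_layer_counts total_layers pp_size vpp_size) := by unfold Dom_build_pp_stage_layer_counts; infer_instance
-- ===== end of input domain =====

-- B fuses A's two phases (build the full per-chunk table, then a nested strided grouped sum over it)
-- into a single pass that accumulates each chunk's layer count into bucket chunk_id % pp_size (objective: simpler).

-- ===== PORT A =====
-- helper build_chunk_layer_counts, transliterated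
def build_chunk_layer_counts (total_layers : Int) (pp_size : Int) (vpp_size : Int) : List Int :=
  let tl := max 0 total_layers
  let pp := max 1 pp_size
  let vpp := max 1 vpp_size
  let tc := pp * vpp
  (PySem.List.pyRange 0 tc 1).foldl
    (fun counts chunk_id =>
      counts ++ [max 0 (PySem.Int.floordiv ((chunk_id + 1) * tl) tc
                        - PySem.Int.floordiv (chunk_id * tl) tc)]) []

-- chunk_counts[vp_stage * pp_size + pp_rank]: pyGetD is exact here because Pre_ (1 ≤ pp_size)
-- keeps the index in range (Raise.InRange); outside Pre_ Python may raise IndexError.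
def build_pp_stage_layer_counts (total_layers : Int) (pp_size : Int) (vpp_size : Int) : List Int :=
  let chunk_counts := build_chunk_layer_counts total_layers pp_size vpp_size
  (PySem.List.pyRange 0 (max 1 pp_size) 1).foldl
    (fun stage_counts pp_rank =>
      stage_counts ++
        [(PySem.List.pyRange 0 (max 1 vpp_size) 1).foldl
          (fun s vp_stage => s + PySem.List.pyGetD chunk_counts (vp_stage * pp_size + pp_rank) 0) 0]) []

-- ===== PORT B =====
-- stage_counts[chunk_id % pp] += d: pySetD/pyGetD are exact — 0 ≤ chunk_id % pp < pp = length.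
def build_pp_stage_layer_counts_alt (total_layers : Int) (pp_size : Int) (vpp_size : Int) : List Int :=
  let tl := max 0 total_layers
  let pp := max 1 pp_size
  let vpp := max 1 vpp_size
  let tc := pp * vpp
  (PySem.List.pyRange 0 tc 1).foldl
    (fun stage_counts chunk_id =>
      let d := max 0 (PySem.Int.floordiv ((chunk_id + 1) * tl) tc
                      - PySem.Int.floordiv (chunk_id * tl) tc)
      PySem.List.pySetD stage_counts (PySem.Int.mod chunk_id pp)
        (PySem.List.pyGetD stage_counts (PySem.Int.mod chunk_id pp) 0 + d))
    (List.replicate pp.toNat 0)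

-- ===== PRECONDITION & SPEC =====
-- Pre_ restricts to the natural domain pp_size ≥ 1: for pp_size ≤ 0 A indexes the chunk table with
-- the UNCLAMPED pp_size and either raises IndexError or returns accidental values via Python's
-- negative-index wraparound / degenerate aliasing, while B (which clamps) returns the intended list.
def Pre_build_pp_stage_layer_counts (total_layers : Int) (pp_size : Int) (vpp_size : Int) : Prop :=
  1 ≤ pp_size
instance (total_layers : Int) (pp_size : Int) (vpp_size : Int) : Decidable (Pre_build_pp_stage_layer_counts total_layers pp_size vpp_size) := by unfold Pre_build_pp_stage_layer_counts; infer_instance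

def pvWitness_build_pp_stage_layer_counts : Int × Int × Int := (13, 4, 3)

def Spec_build_pp_stage_layer_counts (total_layers : Int) (pp_size : Int) (vpp_size : Int) (out : List Int) : Prop := out = build_pp_stage_layer_counts_alt total_layers pp_size vpp_size
instance (total_layers : Int) (pp_size : Int) (vpp_size : Int) (out : List Int) : Decidable (Spec_build_pp_stage_layer_counts total_layers pp_size vpp_size out) := by unfold Spec_build_pp_stage_layer_counts; infer_instance

-- ===== CLAIM (what is proved, stated in full; the proofs are below) =====
def Claim_equal_build_pp_stage_layer_counts : Prop := ∀ (total_layers : Int) (pp_size : Int) (vpp_size : Int), Dom_build_pp_stage_layer_counts total_layers pp_size vpp_size → Pre_build_pp_stage_layer_counts total_layers pp_size vpp_size → Spec_build_pp_stage_layer_counts total_layers pp_size vpp_size (build_pp_stage_layer_counts total_layers pp_size vpp_size)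

-- ===== LEMMAS AND PROOFS =====

-- getD facts about List.set used by the bucket-fold characterisation
lemma getD_set_ne (xs : List Int) (i r : Nat) (v : Int) (hne : i ≠ r) :
    (xs.set i v).getD r 0 = xs.getD r 0 := by
  simp [List.getD, hne]

lemma getD_set_self (xs : List Int) (i : Nat) (v : Int) (hi : i < xs.length) :
    (xs.set i v).getD i 0 = v := by
  simp [List.getD, hi]

-- the bucket fold preserves length
lemma bucket_foldl_length (g : Nat → Int) (idx : Nat → Nat) :
    ∀ (L : List Nat) (acc : List Int),
      (L.foldl (fun s c => s.set (idx c) (s.getD (idx c) 0 + g c)) acc).length = acc.length := by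
  intro L
  induction L with
  | nil => intro acc; rfl
  | cons c L ih => intro acc; rw [List.foldl_cons, ih]; simp

-- entry r of the bucket fold = entry r of acc + sum of g over the elements landing in bucket r
lemma bucket_foldl_getD (g : Nat → Int) (idx : Nat → Nat) :
    ∀ (L : List Nat) (acc : List Int), (∀ c ∈ L, idx c < acc.length) → ∀ r : Nat,
      (L.foldl (fun s c => s.set (idx c) (s.getD (idx c) 0 + g c)) acc).getD r 0
        = acc.getD r 0 + ((L.filter (fun c => idx c = r)).map g).sum := by
  intro L
  induction L with
  | nil => intro acc _ r; simp
  | cons c L ih =>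
    intro acc h r
    have hc : idx c < acc.length := h c (List.mem_cons_self)
    have hrest : ∀ x ∈ L, idx x < (acc.set (idx c) (acc.getD (idx c) 0 + g c)).length := by
      intro x hx; simpa using h x (List.mem_cons_of_mem _ hx)
    rw [List.foldl_cons, ih _ hrest r]
    by_cases hir : idx c = r
    · subst hir
      rw [getD_set_self _ _ _ hc]
      simp [List.filter_cons]
      ring
    · rw [getD_set_ne _ _ _ _ hir]
      simp [List.filter_cons, hir]

lemma filter_range_ge (r n : Nat) (h : n ≤ r) :
    (List.range n).filter (fun c => c = r) = [] := by
  rw [List.filter_eq_nil_iff]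
  intro c hc
  simp only [List.mem_range] at hc
  simp; omega

lemma filter_range_eq (r n : Nat) (h : r < n) :
    (List.range n).filter (fun c => c = r) = [r] := by
  induction n with
  | zero => omega
  | succ n ih =>
    rw [List.range_succ, List.filter_append]
    by_cases hr : r = n
    · subst hr
      rw [filter_range_ge r r (le_refl r)]
      simp
    · have hr' : r < n := by omega
      rw [ih hr']
      simp [hr, Ne.symm hr]

-- regrouping: summing g over the chunks in bucket r equals the strided sum over vp stages
lemma reindex_sum (g : Nat → Int) (n r : Nat) (hn : 0 < n) (hr : r < n) :
    ∀ m : Nat,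
      (((List.range (n * m)).filter (fun c => c % n = r)).map g).sum
        = ((List.range m).map (fun v => g (v * n + r))).sum := by
  intro m
  induction m with
  | zero => simp
  | succ m ih =>
    have hstep : n * (m + 1) = n * m + n := by ring
    rw [hstep, List.range_add, List.filter_append, List.map_append, List.sum_append, ih]
    have hmap : (List.filter (fun c => c % n = r) ((List.range n).map (fun x => n * m + x)))
        = ((List.range n).filter (fun c => c = r)).map (fun x => n * m + x) := by
      rw [List.filter_map]
      congr 1
      apply List.filter_congr
      intro x hx
      simp only [List.mem_range] at hx
      simp [Function.comp, Nat.mul_add_mod, Nat.mod_eq_of_lt hx]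
    rw [hmap, filter_range_eq r n hr, List.range_succ]
    simp [Nat.mul_comm]

-- the chunk-count expression both programs share
def chunkVal (tl tc : Int) (c : Int) : Int :=
  max 0 (PySem.Int.floordiv ((c + 1) * tl) tc - PySem.Int.floordiv (c * tl) tc)

-- A's helper is the map of chunkVal over the chunk ids
lemma chunk_layer_counts_eq_map (total_layers pp_size vpp_size : Int) :
    build_chunk_layer_counts total_layers pp_size vpp_size
      = (PySem.List.pyRange 0 (max 1 pp_size * max 1 vpp_size) 1).map
          (chunkVal (max 0 total_layers) (max 1 pp_size * max 1 vpp_size)) := by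
  unfold build_chunk_layer_counts chunkVal
  rw [PySem.List.foldl_append_singleton_eq_map]
  simp

-- a Nat-indexed stage_counts[k] = v assignment is List.set (out of range: both are the identity)
lemma pySetD_natCast (xs : List Int) (k : Nat) (v : Int) :
    PySem.List.pySetD xs (k : Int) v = xs.set k v := by
  simp only [PySem.List.pySetD, PySem.List.pySet?, PySem.List.pyIdx?]
  by_cases h : k < xs.length
  · rw [if_pos (by positivity), if_pos (by exact_mod_cast h)]
    simp
  · rw [if_pos (by positivity), if_neg (by exact_mod_cast h)]
    simp [List.set_eq_of_length_le (Nat.le_of_not_lt h)]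

-- ===== VERDICT (by name: the statement is the Claim_ definition above) =====
theorem build_pp_stage_layer_counts_spec : Claim_equal_build_pp_stage_layer_counts := by
  intro total_layers pp_size vpp_size _ hpre
  unfold Spec_build_pp_stage_layer_counts
  unfold Pre_build_pp_stage_layer_counts at hpre
  -- name the clamped quantities as naturals
  set n : Nat := pp_size.toNat with hn_def
  set m : Nat := (max 1 vpp_size).toNat with hm_def
  have hpp : max 1 pp_size = (n : Int) := by
    simp only [hn_def]; omega
  have hvpp : max 1 vpp_size = (m : Int) := by
    simp only [hm_def]; omega
  have hn1 : 1 ≤ n := by omega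
  have hm1 : 1 ≤ m := by omega
  have htc : max 1 pp_size * max 1 vpp_size = ((n * m : Nat) : Int) := by
    rw [hpp, hvpp]; push_cast; ring
  set tl : Int := max 0 total_layers with htl_def
  set g : Nat → Int := fun c => chunkVal tl ((n * m : Nat) : Int) (c : Int) with hg_def
  -- ===== characterise A =====
  have hchunks : build_chunk_layer_counts total_layers pp_size vpp_size
      = (PySem.List.pyRange 0 ((n * m : Nat) : Int) 1).map (chunkVal tl ((n * m : Nat) : Int)) := by
    rw [chunk_layer_counts_eq_map, htc, htl_def]
  have hidx : ∀ v k : Nat, v < m → k < n →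
      PySem.List.pyGetD (build_chunk_layer_counts total_layers pp_size vpp_size)
        ((v : Int) * pp_size + (k : Int)) 0 = g (v * n + k) := by
    intro v k hv hk
    have harg : (v : Int) * pp_size + (k : Int) = ((v * n + k : Nat) : Int) := by
      have : pp_size = (n : Int) := by omega
      rw [this]; push_cast; ring
    have hlt : v * n + k < n * m := by
      calc v * n + k < v * n + n := by omega
        _ = (v + 1) * n := by ring
        _ ≤ m * n := Nat.mul_le_mul_right n (by omega)
        _ = n * m := Nat.mul_comm m n
    rw [hchunks, harg, PySem.List.pyGetD_map_pyRange_of_nonneg _ _ _ _ (by positivity)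
      (by exact_mod_cast hlt)]
  have hA : build_pp_stage_layer_counts total_layers pp_size vpp_size
      = (List.range n).map (fun k => ((List.range m).map (fun v => g (v * n + k))).sum) := by
    unfold build_pp_stage_layer_counts
    rw [PySem.List.foldl_append_singleton_eq_map, List.nil_append, hpp, hvpp,
      PySem.List.pyRange_zero_natCast, PySem.List.pyRange_zero_natCast, List.map_map]
    apply List.map_congr_left
    intro k hk
    simp only [List.mem_range] at hk
    simp only [Function.comp]
    rw [List.foldl_map, PySem.List.foldl_add, zero_add]
    apply congrArg List.sum
    apply List.map_congr_left
    intro v hv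
    simp only [List.mem_range] at hv
    exact hidx v k hv hk
  -- ===== characterise B =====
  have hBfold : build_pp_stage_layer_counts_alt total_layers pp_size vpp_size
      = (List.range (n * m)).foldl
          (fun s c => s.set (c % n) (s.getD (c % n) 0 + g c)) (List.replicate n 0) := by
    unfold build_pp_stage_layer_counts_alt
    have htc2 : (n : Int) * (m : Int) = ((n * m : Nat) : Int) := by push_cast; ring
    simp only [hpp, hvpp]
    rw [htc2, PySem.List.pyRange_zero_natCast, List.foldl_map, Int.toNat_natCast]
    apply List.foldl_ext
    intro s c' hc'
    simp only [List.mem_range] at hc'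
    have hmod : PySem.Int.mod (c' : Int) (n : Int) = ((c' % n : Nat) : Int) :=
      PySem.Int.mod_natCast c' n
    rw [hmod, PySem.List.pyGetD_natCast]
    -- the accumulated value is definitionally g c'
    show PySem.List.pySetD s ((c' % n : Nat) : Int) (s.getD (c' % n) 0 + g c')
        = s.set (c' % n) (s.getD (c' % n) 0 + g c')
    exact pySetD_natCast s (c' % n) _
  have hinrange : ∀ c ∈ List.range (n * m), c % n < (List.replicate n (0 : Int)).length := by
    intro c _
    simp only [List.length_replicate]
    exact Nat.mod_lt c (by omega)
  have hBlen : (build_pp_stage_layer_counts_alt total_layers pp_size vpp_size).length = n := by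
    rw [hBfold, bucket_foldl_length]; simp
  have hBgetD : ∀ r : Nat, r < n →
      (build_pp_stage_layer_counts_alt total_layers pp_size vpp_size).getD r 0
        = ((List.range m).map (fun v => g (v * n + r))).sum := by
    intro r hr
    rw [hBfold, bucket_foldl_getD g (fun c => c % n) _ _ hinrange r,
      List.getD_replicate, reindex_sum g n r (by omega) hr m]
    · simp
    · exact hr
  -- ===== conclude =====
  have hAlen : (build_pp_stage_layer_counts total_layers pp_size vpp_size).length = n := by
    rw [hA]; simp
  apply List.ext_getElem (by rw [hAlen, hBlen])
  intro i h1 h2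
  have hi : i < n := by omega
  have hBi := hBgetD i hi
  rw [List.getD_eq_getElem _ 0 h2] at hBi
  rw [hBi]
  simp [hA]
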